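-- pv_equiv track=rewrite | github.com/alright212/ITI0102_2022 | KT/kt3/exam.py | only_one_pair
-- ===== SOURCE A (Python) =====
-- def only_one_pair(numbers: list) -> bool:
--     """
--     Whether the list only has one pair.
--
--     Function returns True, if the list only has one pair (two elements have the same value).
--     In other cases:
--      there are no elements with the same value
--      there are more than 2 elements with the same value
--      there are several pairs
--     returns False.
--
--     only_one_pair([1, 2, 3]) => False
--     only_one_pair([1]) => False
--     only_one_pair([1, 2, 3, 1]) => True
--     only_one_pair([1, 2, 1, 3, 1]) => False
--     only_one_pair([1, 2, 1, 3, 1, 2]) => False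
--     """
--     count = 0
--     if len(numbers) < 2:
--         return False
--     for i in range(len(numbers)):
--         for j in range(i + 1, len(numbers)):
--             if numbers[i] == numbers[j]:
--                 count += 1
--     return count == 1
-- ===== SOURCE B (Python) =====
-- def only_one_pair(numbers: list) -> bool:
--     seen = {}
--     pairs = 0
--     for x in numbers:
--         c = seen.get(x, 0)
--         pairs += c
--         seen[x] = c + 1
--     return pairs == 1
-- ===== Notes on version B (the rewrite author's own statement) =====
-- stated objective: faster
-- what changed: Replaced the O(n^2) nested index loops that compare every pair with a single pass keeping a dict of occurrence counts, adding the number of earlier equal elements for each element.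
import Mathlib
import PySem

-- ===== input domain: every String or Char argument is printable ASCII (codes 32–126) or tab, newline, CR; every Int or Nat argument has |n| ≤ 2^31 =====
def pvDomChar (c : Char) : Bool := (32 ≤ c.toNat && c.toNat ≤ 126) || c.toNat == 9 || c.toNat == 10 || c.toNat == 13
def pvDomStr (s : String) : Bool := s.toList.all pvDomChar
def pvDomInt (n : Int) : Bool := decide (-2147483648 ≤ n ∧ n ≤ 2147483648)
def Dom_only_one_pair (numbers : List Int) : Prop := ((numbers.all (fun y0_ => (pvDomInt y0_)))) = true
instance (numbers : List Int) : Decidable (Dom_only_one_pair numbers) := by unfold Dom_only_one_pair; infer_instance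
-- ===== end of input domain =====

-- B replaces A's O(n^2) nested index loops by a single pass with a dict of seen counts (faster).


-- ===== PORT A =====
-- literal port: count = 0; if len < 2 return False; double loop over indices; count == 1
def only_one_pair (numbers : List Int) : Bool :=
  if PySem.List.len numbers < 2 then false
  else
    let count : Int :=
      (PySem.List.pyRange 0 (PySem.List.len numbers)).foldl (fun count i =>
        (PySem.List.pyRange (i + 1) (PySem.List.len numbers)).foldl (fun count j =>
          if PySem.List.pyGetD numbers i 0 == PySem.List.pyGetD numbers j 0 then count + 1
          else count) count) 0
    count == 1

-- ===== PORT B =====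
-- literal port of Source B: one pass, dict `seen` of counts, pairs += (# earlier equal elements)
def only_one_pair_alt (numbers : List Int) : Bool :=
  let st := numbers.foldl
    (fun (st : PySem.Dict Int Int × Int) x =>
      (st.1.insert x (st.1.getD x 0 + 1), st.2 + st.1.getD x 0))
    ((PySem.Dict.empty : PySem.Dict Int Int), 0)
  st.2 == 1

-- ===== PRECONDITION & SPEC =====
def Spec_only_one_pair (numbers : List Int) (out : Bool) : Prop := out = only_one_pair_alt numbers
instance (numbers : List Int) (out : Bool) : Decidable (Spec_only_one_pair numbers out) := by unfold Spec_only_one_pair; infer_instance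

-- ===== CLAIM (what is proved, stated in full; the proofs are below) =====
def Claim_equal_only_one_pair : Prop := ∀ (numbers : List Int), Dom_only_one_pair numbers → Spec_only_one_pair numbers (only_one_pair numbers)

-- ===== LEMMAS AND PROOFS =====

/-- Number of equal (unordered) pairs in a list: each head pairs with its later duplicates. -/
def pairCount : List Int → Int
  | [] => 0
  | x :: r => (r.count x : Int) + pairCount r

/-- Inner loop of A: counting matches of `v` against positions `a, a+1, …` is counting `v` in `xs.drop a`. -/
lemma countP_range_eq_count (xs : List Int) (v : Int) :
    ∀ (fuel a : Nat), xs.length = a + fuel →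
      ((PySem.List.pyRange (a : Int) (xs.length : Int)).countP
        (fun j => v == PySem.List.pyGetD xs j 0)) = (xs.drop a).count v := by
  intro fuel
  induction fuel with
  | zero =>
      intro a h
      have h1 : (xs.length : Int) ≤ (a : Int) := by omega
      rw [PySem.List.pyRange_one_eq_nil h1, List.drop_eq_nil_of_le (by omega)]
      simp
  | succ f ih =>
      intro a h
      have hlt : (a : Int) < (xs.length : Int) := by exact_mod_cast (by omega : a < xs.length)
      rw [PySem.List.pyRange_one_cons hlt]
      have ha : a < xs.length := by omega
      have hdrop : xs.drop a = xs[a] :: xs.drop (a + 1) := List.drop_eq_getElem_cons ha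
      have hget : PySem.List.pyGetD xs (a : Int) 0 = xs[a] := by
        rw [PySem.List.pyGetD_natCast]
        exact List.getD_eq_getElem xs 0 ha
      have hcast : ((a : Int) + 1) = ((a + 1 : Nat) : Int) := by push_cast; ring
      rw [List.countP_cons, hcast, ih (a + 1) (by omega), hdrop, hget, List.count_cons]
      by_cases hv : xs[a] = v
      · simp [hv]
      · have : (v == xs[a]) = false := by simp [Ne.symm hv]
        simp [this, hv]

/-- Outer loop of A (already turned into a sum): equals `pairCount` of the remaining suffix. -/
lemma sum_range_eq_pairCount (xs : List Int) :
    ∀ (fuel k : Nat), xs.length = k + fuel →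
      ((PySem.List.pyRange (k : Int) (xs.length : Int)).map
        (fun i => ((PySem.List.pyRange (i + 1) (xs.length : Int)).countP
          (fun j => PySem.List.pyGetD xs i 0 == PySem.List.pyGetD xs j 0) : Int))).sum
        = pairCount (xs.drop k) := by
  intro fuel
  induction fuel with
  | zero =>
      intro k h
      have h1 : (xs.length : Int) ≤ (k : Int) := by omega
      rw [PySem.List.pyRange_one_eq_nil h1, List.drop_eq_nil_of_le (by omega)]
      simp [pairCount]
  | succ f ih =>
      intro k h
      have hk : k < xs.length := by omega
      have hlt : (k : Int) < (xs.length : Int) := by exact_mod_cast hk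
      rw [PySem.List.pyRange_one_cons hlt]
      have hdrop : xs.drop k = xs[k] :: xs.drop (k + 1) := List.drop_eq_getElem_cons hk
      have hcast : ((k : Int) + 1) = ((k + 1 : Nat) : Int) := by push_cast; ring
      rw [List.map_cons, List.sum_cons, hcast, ih (k + 1) (by omega), hdrop]
      have hinner : ((PySem.List.pyRange ((k + 1 : Nat) : Int) (xs.length : Int)).countP
          (fun j => PySem.List.pyGetD xs ((k : Nat) : Int) 0 == PySem.List.pyGetD xs j 0))
          = (xs.drop (k + 1)).count (PySem.List.pyGetD xs ((k : Nat) : Int) 0) :=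
        countP_range_eq_count xs _ f (k + 1) (by omega)
      have hget : PySem.List.pyGetD xs ((k : Nat) : Int) 0 = xs[k] := by
        rw [PySem.List.pyGetD_natCast]
        exact List.getD_eq_getElem xs 0 hk
      rw [hinner, hget]
      simp [pairCount]

/-- A computes `pairCount numbers == 1`. -/
lemma only_one_pair_eq_pairCount (numbers : List Int) :
    only_one_pair numbers = (pairCount numbers == 1) := by
  unfold only_one_pair
  by_cases hlen : PySem.List.len numbers < 2
  · rw [if_pos hlen]
    have : numbers.length < 2 := by
      simp only [PySem.List.len] at hlen; exact_mod_cast hlen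
    match numbers, this with
    | [], _ => simp [pairCount]
    | [x], _ => simp [pairCount]
  · rw [if_neg hlen]
    simp only [PySem.List.foldl_count_if, zero_add, PySem.List.foldl_add, PySem.List.len]
    have := sum_range_eq_pairCount numbers numbers.length 0 (by omega)
    simp only [Nat.cast_zero, List.drop_zero] at this
    rw [this]

/-- Per-step bookkeeping: bumping the count of `x` raises the sum of looked-up counts over `r` by `r.count x`. -/
lemma sum_getD_insert (d : PySem.Dict Int Int) (x : Int) (v : Int) (hv : v = d.getD x 0 + 1) :
    ∀ (r : List Int),
      (r.map (fun y => (d.insert x v).getD y 0)).sum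
        = (r.map (fun y => d.getD y 0)).sum + (r.count x : Int) := by
  intro r
  induction r with
  | nil => simp
  | cons y t ih =>
      simp only [List.map_cons, List.sum_cons, ih, List.count_cons]
      rw [PySem.Dict.getD_insert]
      by_cases hxy : y = x
      · simp [hxy, hv]; ring
      · have : (x == y) = false := by simp [Ne.symm hxy]
        simp [hxy]; ring

/-- Loop invariant of B's single pass. -/
lemma alt_loop (l : List Int) :
    ∀ (d : PySem.Dict Int Int) (acc : Int),
      (l.foldl (fun (st : PySem.Dict Int Int × Int) x =>
          (st.1.insert x (st.1.getD x 0 + 1), st.2 + st.1.getD x 0)) (d, acc)).2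
        = acc + (l.map (fun y => d.getD y 0)).sum + pairCount l := by
  induction l with
  | nil => intro d acc; simp [pairCount]
  | cons x r ih =>
      intro d acc
      simp only [List.foldl_cons]
      rw [ih (d.insert x (d.getD x 0 + 1)) (acc + d.getD x 0),
        sum_getD_insert d x _ rfl r]
      simp [pairCount]
      ring

/-- B computes `pairCount numbers == 1`. -/
lemma only_one_pair_alt_eq_pairCount (numbers : List Int) :
    only_one_pair_alt numbers = (pairCount numbers == 1) := by
  simp only [only_one_pair_alt]
  rw [alt_loop numbers PySem.Dict.empty 0]
  have hempty : ∀ y : Int, (PySem.Dict.empty : PySem.Dict Int Int).getD y 0 = 0 := by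
    intro y; rfl
  simp [hempty]

-- ===== VERDICT (by name: the statement is the Claim_ definition above) =====
theorem only_one_pair_spec : Claim_equal_only_one_pair := by
  intro numbers _
  unfold Spec_only_one_pair
  rw [only_one_pair_eq_pairCount, only_one_pair_alt_eq_pairCount]
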